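-- pv_equiv track=rewrite | github.com/S3pR78/Bachelor_Thesis | code/src/evaluate/metrics/sparql_structure_match.py | _split_standalone_dot_statements
-- ===== SOURCE A (Python) =====
-- def _is_statement_dot(text: str, index: int) -> bool:
--     previous_char = text[index - 1] if index > 0 else ""
--     next_char = text[index + 1] if index + 1 < len(text) else ""
--
--     # SPARQL statement dots may appear as either:
--     #   ?s ?p ?o .
--     # or compactly:
--     #   ?s ?p ?o.
--     #
--     # We therefore mainly require that the next character ends the statement.
--     # Dots inside IRIs are already protected by the in_iri state in the caller.
--     # Decimal literals such as 1.0 are not matched because the next character is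
--     # not whitespace/end/closing brace.
--     previous_ok = previous_char != ""
--     next_ok = next_char == "" or next_char.isspace() or next_char == "}"
--
--     return previous_ok and next_ok
--
-- def _split_standalone_dot_statements(text: str) -> list[str]:
--     statements: list[str] = []
--     current: list[str] = []
--
--     in_iri = False
--     quote_char: str | None = None
--     escaped = False
--
--     def flush_current() -> None:
--         statement = "".join(current).strip()
--         current.clear()
--         if statement:
--             statements.append(statement)
--
--     index = 0
--     while index < len(text):
--         char = text[index]
--
--         if quote_char is not None:
--             current.append(char)
--
--             if escaped:
--                 escaped = False
--                 index += 1
--                 continue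
--
--             if char == "\\":
--                 escaped = True
--                 index += 1
--                 continue
--
--             if char == quote_char:
--                 quote_char = None
--
--             index += 1
--             continue
--
--         if in_iri:
--             current.append(char)
--             if char == ">":
--                 in_iri = False
--             index += 1
--             continue
--
--         if char in {"'", '"'}:
--             quote_char = char
--             current.append(char)
--             index += 1
--             continue
--
--         if char == "<":
--             in_iri = True
--             current.append(char)
--             index += 1
--             continue
--
--         if char == "." and _is_statement_dot(text, index):
--             flush_current()
--             index += 1
--             continue
--
--         current.append(char)
--         index += 1
--
--     flush_current()
--     return statements
-- ===== SOURCE B (Python) =====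
-- def _split_standalone_dot_statements(text: str) -> list[str]:
--     # Pass 1: find the indices of the statement dots (same quote/IRI protection).
--     cuts = []
--     in_iri = False
--     quote_char = None
--     escaped = False
--     for i, ch in enumerate(text):
--         if quote_char is not None:
--             if escaped:
--                 escaped = False
--             elif ch == "\\":
--                 escaped = True
--             elif ch == quote_char:
--                 quote_char = None
--         elif in_iri:
--             if ch == ">":
--                 in_iri = False
--         elif ch in ("'", '"'):
--             quote_char = ch
--         elif ch == "<":
--             in_iri = True
--         elif ch == "." and i > 0 and (
--             i + 1 == len(text) or text[i + 1].isspace() or text[i + 1] == "}"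
--         ):
--             cuts.append(i)
--     # Pass 2: slice the text between the cut points.
--     statements = []
--     prev = 0
--     for c in cuts + [len(text)]:
--         segment = text[prev:c].strip()
--         if segment:
--             statements.append(segment)
--         prev = c + 1
--     return statements
-- ===== Notes on version B (the rewrite author's own statement) =====
-- stated objective: alternative
-- what changed: B replaces A's per-character buffer accumulation and flush-on-dot with a two-pass scheme: a first scan collects the indices of the statement dots, then a second pass slices the text between consecutive cut points, strips each slice and keeps the non-empty ones.
import Mathlib
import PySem

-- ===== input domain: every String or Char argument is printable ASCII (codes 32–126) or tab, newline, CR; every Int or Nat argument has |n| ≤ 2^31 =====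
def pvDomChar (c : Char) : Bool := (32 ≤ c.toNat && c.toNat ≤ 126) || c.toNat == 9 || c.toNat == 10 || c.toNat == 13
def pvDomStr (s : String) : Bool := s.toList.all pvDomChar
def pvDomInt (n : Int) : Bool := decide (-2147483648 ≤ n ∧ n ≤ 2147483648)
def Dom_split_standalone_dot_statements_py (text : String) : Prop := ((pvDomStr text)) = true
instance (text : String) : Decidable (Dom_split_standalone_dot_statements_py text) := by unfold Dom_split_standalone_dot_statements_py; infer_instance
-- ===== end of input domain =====

-- B replaces A's per-character buffer accumulation by a two-pass scheme: first collect the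
-- statement-dot indices, then slice the text between them (objective: alternative decomposition).


-- ===== PORT A =====
-- _is_statement_dot: previous_char is only compared with "" so previous_ok ↔ index > 0
def pvIsStatementDotA (text : List Char) (index : Nat) : Bool :=
  let previous_ok := decide (0 < index)
  let next_ok :=
    match text[index + 1]? with
    | none => true                                    -- next_char == ""
    | some c => PySem.Chars.isspace c || c == '}'
  previous_ok && next_ok

-- flush_current(): strip, drop if empty
def pvFlushA (statements : List String) (current : List Char) : List String :=
  let statement := PySem.Chars.strip current
  if statement = [] then statements else statements ++ [String.ofList statement]

-- the while loop: rest is the suffix of text starting at index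
def pvLoopA (text : List Char) : List Char → Nat → List String → List Char → Bool → Option Char → Bool → List String
  | [], _, sts, cur, _, _, _ => pvFlushA sts cur
  | ch :: rest, i, sts, cur, in_iri, q, esc =>
    match q with
    | some qc =>
      let cur' := cur ++ [ch]
      if esc then pvLoopA text rest (i+1) sts cur' in_iri q false
      else if ch == '\\' then pvLoopA text rest (i+1) sts cur' in_iri q true
      else if ch == qc then pvLoopA text rest (i+1) sts cur' in_iri none esc
      else pvLoopA text rest (i+1) sts cur' in_iri q esc
    | none =>
      if in_iri then
        pvLoopA text rest (i+1) sts (cur ++ [ch]) (if ch == '>' then false else in_iri) none esc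
      else if ch == '\'' || ch == '"' then
        pvLoopA text rest (i+1) sts (cur ++ [ch]) in_iri (some ch) esc
      else if ch == '<' then
        pvLoopA text rest (i+1) sts (cur ++ [ch]) true none esc
      else if ch == '.' && pvIsStatementDotA text i then
        pvLoopA text rest (i+1) (pvFlushA sts cur) [] in_iri none esc
      else
        pvLoopA text rest (i+1) sts (cur ++ [ch]) in_iri none esc

def split_standalone_dot_statements_py (text : String) : List String :=
  pvLoopA text.toList text.toList 0 [] [] false none false

-- ===== PORT B =====
-- pass 1: collect the indices of the statement dots
def pvCutsB (text : List Char) : List Char → Nat → Bool → Option Char → Bool → List Nat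
  | [], _, _, _, _ => []
  | ch :: rest, i, in_iri, q, esc =>
    match q with
    | some qc =>
      if esc then pvCutsB text rest (i+1) in_iri q false
      else if ch == '\\' then pvCutsB text rest (i+1) in_iri q true
      else if ch == qc then pvCutsB text rest (i+1) in_iri none esc
      else pvCutsB text rest (i+1) in_iri q esc
    | none =>
      if in_iri then pvCutsB text rest (i+1) (if ch == '>' then false else in_iri) none esc
      else if ch == '\'' || ch == '"' then pvCutsB text rest (i+1) in_iri (some ch) esc
      else if ch == '<' then pvCutsB text rest (i+1) true none esc
      else if ch == '.' && (decide (0 < i) &&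
          (i + 1 == text.length ||
            (match text[i + 1]? with
             | some c => PySem.Chars.isspace c || c == '}'
             | none => false))) then
        i :: pvCutsB text rest (i+1) in_iri none esc
      else pvCutsB text rest (i+1) in_iri none esc

-- pass 2: slice between consecutive cut points, strip, keep the non-empty ones
def pvStepB (cs : List Char) (acc : List String × Nat) (c : Nat) : List String × Nat :=
  let seg := PySem.Chars.strip (PySem.List.slice cs (some (acc.2 : Int)) (some (c : Int)))
  (if seg = [] then acc.1 else acc.1 ++ [String.ofList seg], c + 1)

def split_standalone_dot_statements_py_alt (text : String) : List String :=
  let cs := text.toList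
  let cuts := pvCutsB cs cs 0 false none false
  ((cuts ++ [cs.length]).foldl (pvStepB cs) ([], 0)).1

-- ===== PRECONDITION & SPEC =====
def Spec_split_standalone_dot_statements_py (text : String) (out : List String) : Prop := out = split_standalone_dot_statements_py_alt text
instance (text : String) (out : List String) : Decidable (Spec_split_standalone_dot_statements_py text out) := by unfold Spec_split_standalone_dot_statements_py; infer_instance

-- ===== CLAIM (what is proved, stated in full; the proofs are below) =====
def Claim_equal_split_standalone_dot_statements_py : Prop := ∀ (text : String), Dom_split_standalone_dot_statements_py text → Spec_split_standalone_dot_statements_py text (split_standalone_dot_statements_py text)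

-- ===== LEMMAS AND PROOFS =====

-- the segments determined by a cut list: the chars between consecutive cuts, stripped, empties dropped
def pvSegs (cs : List Char) : List Char → Nat → List Nat → List String
  | cur, i, [] => pvFlushA [] (cur ++ cs.drop i)
  | cur, i, c :: rest => pvFlushA [] (cur ++ (cs.drop i).take (c - i)) ++ pvSegs cs [] (c+1) rest

theorem pvFlushA_split (sts : List String) (cur : List Char) :
    pvFlushA sts cur = sts ++ pvFlushA [] cur := by
  simp only [pvFlushA]; split <;> simp

theorem pvCutsB_ge (cs : List Char) (rest : List Char) (i : Nat) (iri : Bool) (q : Option Char)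
    (esc : Bool) : ∀ x ∈ pvCutsB cs rest i iri q esc, i ≤ x := by
  induction rest generalizing i iri q esc with
  | nil => simp [pvCutsB]
  | cons ch rest ih =>
    intro x hx
    rcases q with _ | qc <;> simp only [pvCutsB] at hx <;>
      split_ifs at hx <;>
      first
        | exact Nat.le_of_succ_le (ih _ _ _ _ _ hx)
        | (rcases List.mem_cons.1 hx with h | h
           exacts [by omega, Nat.le_of_succ_le (ih _ _ _ _ _ h)])

theorem pvSegs_shift (cs : List Char) (cur : List Char) (ch : Char) (i : Nat) (cuts : List Nat)
    (hdrop : cs.drop i = ch :: cs.drop (i+1)) (hge : ∀ x ∈ cuts, i + 1 ≤ x) :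
    pvSegs cs (cur ++ [ch]) (i+1) cuts = pvSegs cs cur i cuts := by
  cases cuts with
  | nil => simp [pvSegs, hdrop]
  | cons c rest =>
    have hc : i + 1 ≤ c := hge c (by simp)
    have : (cs.drop i).take (c - i) = ch :: (cs.drop (i+1)).take (c - (i+1)) := by
      rw [hdrop]
      have : c - i = (c - (i+1)) + 1 := by omega
      rw [this, List.take_succ_cons]
    simp [pvSegs, this]

-- A's loop produces exactly the segments of B's cut list
theorem pvLoopA_eq_segs (cs : List Char) (rest : List Char) (i : Nat) (sts : List String)
    (cur : List Char) (iri : Bool) (q : Option Char) (esc : Bool) (hdrop : rest = cs.drop i) :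
    pvLoopA cs rest i sts cur iri q esc = sts ++ pvSegs cs cur i (pvCutsB cs rest i iri q esc) := by
  induction rest generalizing i sts cur iri q esc with
  | nil =>
    simp only [pvLoopA, pvCutsB, pvSegs, ← hdrop, List.append_nil]
    exact pvFlushA_split sts cur
  | cons ch rest ih =>
    have hdrop' : rest = cs.drop (i+1) := by
      have := congrArg List.tail hdrop
      simpa [List.tail_drop] using this
    have hshiftall : ∀ iri' q' esc',
        pvSegs cs (cur ++ [ch]) (i+1) (pvCutsB cs rest (i+1) iri' q' esc') =
        pvSegs cs cur i (pvCutsB cs rest (i+1) iri' q' esc') := fun iri' q' esc' =>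
      pvSegs_shift cs cur ch i _ (by rw [← hdrop, ← hdrop'])
        (pvCutsB_ge cs rest (i+1) iri' q' esc')
    -- the two dot conditions agree (rest = drop i nonempty ⇒ i < cs.length)
    have hlen : i < cs.length := by
      by_contra h
      exact List.cons_ne_nil _ _ (hdrop.trans (List.drop_eq_nil_of_le (by omega)))
    have hdot : pvIsStatementDotA cs i =
        (decide (0 < i) &&
          ((i + 1 == cs.length ||
            (match cs[i + 1]? with
             | some c => PySem.Chars.isspace c || c == '}'
             | none => false)))) := by
      simp only [pvIsStatementDotA]
      rcases h : cs[i+1]? with _ | c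
      · have hend : i + 1 = cs.length := by
          have := List.getElem?_eq_none_iff.1 h
          omega
        simp [hend]
      · have hne : i + 1 ≠ cs.length := by
          obtain ⟨hl, -⟩ := List.getElem?_eq_some_iff.1 h
          omega
        have hb : (i + 1 == cs.length) = false := by simpa using hne
        simp [hb]
    rcases q with _ | qc
    · simp only [pvLoopA, pvCutsB, hdot]
      by_cases hiri : iri = true
      · simp only [hiri, if_true]
        rw [ih _ _ _ _ _ _ hdrop', hshiftall]
      · simp only [hiri, if_neg (by simp : ¬ (false = true))]
        split_ifs with h1 h2 h3
        · rw [ih _ _ _ _ _ _ hdrop', hshiftall]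
        · rw [ih _ _ _ _ _ _ hdrop', hshiftall]
        · -- statement dot: both sides close the current segment at index i
          rw [ih _ _ _ _ _ _ hdrop', pvFlushA_split sts cur]
          simp [pvSegs]
        · rw [ih _ _ _ _ _ _ hdrop', hshiftall]
    · simp only [pvLoopA, pvCutsB]
      split_ifs with h1 h2 h3 <;> rw [ih _ _ _ _ _ _ hdrop', hshiftall]

-- B's fold over the cut list computes the same segments
theorem pvFoldB_eq_segs (cs : List Char) (cuts : List Nat) (sts : List String) (prev : Nat) :
    ((cuts ++ [cs.length]).foldl (pvStepB cs) (sts, prev)).1 = sts ++ pvSegs cs [] prev cuts := by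
  induction cuts generalizing sts prev with
  | nil =>
    have : (cs.drop prev).take (cs.length - prev) = cs.drop prev :=
      List.take_of_length_le (by simp)
    simp [pvStepB, pvSegs, pvFlushA, PySem.List.slice_natCast, this]
    split <;> simp
  | cons c rest ih =>
    simp only [List.cons_append, List.foldl_cons]
    rw [ih]
    simp only [pvStepB, pvSegs, pvFlushA, PySem.List.slice_natCast, List.nil_append]
    split <;> simp

-- ===== VERDICT (by name: the statement is the Claim_ definition above) =====
theorem split_standalone_dot_statements_py_spec : Claim_equal_split_standalone_dot_statements_py := by
  intro text _
  unfold Spec_split_standalone_dot_statements_py split_standalone_dot_statements_py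
    split_standalone_dot_statements_py_alt
  rw [pvLoopA_eq_segs text.toList text.toList 0 [] [] false none false (by simp),
    pvFoldB_eq_segs]
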